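-- pv_equiv track=rewrite | github.com/Vectorredz/Folder | Prev/final.py | find_sublists_with_common_elements
-- ===== SOURCE A (Python) =====
-- def find_sublists_with_common_elements(lst):
--     result = []
--     for i, sublist1 in enumerate(lst):
--         for j, sublist2 in enumerate(lst):
--             if i != j and any(element in sublist1 for element in sublist2):
--                 result.append(sublist1)
--                 break
--     return result
-- ===== SOURCE B (Python) =====
-- def find_sublists_with_common_elements(lst):
--     counts = {}
--     for sub in lst:
--         for e in set(sub):
--             counts[e] = counts.get(e, 0) + 1
--     return [sub for sub in lst if any(counts.get(e, 0) >= 2 for e in sub)]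
-- ===== Notes on version B (the rewrite author's own statement) =====
-- stated objective: alternative
-- what changed: Replaces the nested all-pairs scan (for each sublist, search every other sublist for a shared element) by two passes: a dict counts in how many sublists each element occurs, then each sublist is kept iff one of its elements occurs in at least two sublists.
import Mathlib
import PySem

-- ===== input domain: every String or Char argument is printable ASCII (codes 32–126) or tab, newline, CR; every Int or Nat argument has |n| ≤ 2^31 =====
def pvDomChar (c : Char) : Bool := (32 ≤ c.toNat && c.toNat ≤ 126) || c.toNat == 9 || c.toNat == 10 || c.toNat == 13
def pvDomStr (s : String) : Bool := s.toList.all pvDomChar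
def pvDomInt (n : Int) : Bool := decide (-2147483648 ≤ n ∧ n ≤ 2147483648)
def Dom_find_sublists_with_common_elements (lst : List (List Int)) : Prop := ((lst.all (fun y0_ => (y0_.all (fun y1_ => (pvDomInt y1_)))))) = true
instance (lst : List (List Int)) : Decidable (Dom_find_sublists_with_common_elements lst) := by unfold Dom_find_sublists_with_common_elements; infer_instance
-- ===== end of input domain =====

-- B replaces A's nested all-pairs shared-element scan by a counting pass
-- (element -> number of sublists containing it) plus a filtering pass (objective: alternative).

-- ===== PORT A =====
-- inner 'for j, sublist2 in enumerate(lst): if i != j and any(...): append; break'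
-- modelled as a recursion returning whether the break-append fired
def pvAInner (i : Int) (sublist1 : List Int) : List (Int × List Int) → Bool
  | [] => false
  | (j, sublist2) :: rest =>
    if i ≠ j ∧ sublist2.any (fun e => decide (e ∈ sublist1)) = true then true
    else pvAInner i sublist1 rest

def find_sublists_with_common_elements (lst : List (List Int)) : List (List Int) :=
  (PySem.List.enumerate lst).foldl
    (fun result p =>
      if pvAInner p.1 p.2 (PySem.List.enumerate lst) = true then result ++ [p.2] else result)
    []

-- ===== PORT B =====
def find_sublists_with_common_elements_alt (lst : List (List Int)) : List (List Int) :=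
  let counts : PySem.Dict Int Int :=
    lst.foldl (fun d sub =>
      (PySem.Set.ofList sub).foldl (fun d e => d.insert e (d.getD e 0 + 1)) d)
      PySem.Dict.empty
  lst.filter (fun sub => sub.any (fun e => decide (counts.getD e 0 ≥ 2)))

-- ===== PRECONDITION & SPEC =====
def Spec_find_sublists_with_common_elements (lst : List (List Int)) (out : List (List Int)) : Prop := out = find_sublists_with_common_elements_alt lst
instance (lst : List (List Int)) (out : List (List Int)) : Decidable (Spec_find_sublists_with_common_elements lst out) := by unfold Spec_find_sublists_with_common_elements; infer_instance

-- ===== CLAIM (what is proved, stated in full; the proofs are below) =====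
def Claim_equal_find_sublists_with_common_elements : Prop := ∀ (lst : List (List Int)), Dom_find_sublists_with_common_elements lst → Spec_find_sublists_with_common_elements lst (find_sublists_with_common_elements lst)

-- ===== LEMMAS AND PROOFS =====

-- A's inner break loop fires iff some enumerated pair satisfies the condition
theorem pvAInner_eq_any (i : Int) (s : List Int) (l : List (Int × List Int)) :
    pvAInner i s l = l.any (fun q => decide (i ≠ q.1) && q.2.any (fun e => decide (e ∈ s))) := by
  induction l with
  | nil => rfl
  | cons q rest ih =>
    obtain ⟨j, t⟩ := q
    simp only [pvAInner, List.any_cons]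
    split_ifs with h
    · simp [h.1, h.2]
    · rw [ih]
      rcases Decidable.em (i ≠ j) with hij | hij
      · have ht : t.any (fun e => decide (e ∈ s)) = false := by
          cases hh : t.any (fun e => decide (e ∈ s)) with
          | false => rfl
          | true => exact absurd ⟨hij, hh⟩ h
        simp [ht]
      · simp [hij]

-- B's counter: counts.getD e 0 = number of sublists (with multiplicity) containing e
theorem counts_getD (lst : List (List Int)) (d : PySem.Dict Int Int) (e : Int) :
    (lst.foldl (fun d sub =>
        (PySem.Set.ofList sub).foldl (fun d e => d.insert e (d.getD e 0 + 1)) d) d).getD e 0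
      = d.getD e 0 + (lst.countP (fun t => decide (e ∈ t)) : Int) := by
  induction lst generalizing d with
  | nil => simp
  | cons sub rest ih =>
    simp only [List.foldl_cons, ih, PySem.Dict.getD_foldl_insert_add_one, List.countP_cons]
    have hcnt : (PySem.Set.ofList sub).count e = if e ∈ sub then 1 else 0 := by
      split_ifs with hm
      · exact List.count_eq_one_of_mem (PySem.Set.nodup_ofList sub) ((PySem.Set.mem_ofList sub e).mpr hm)
      · exact List.count_eq_zero_of_not_mem (fun hc => hm ((PySem.Set.mem_ofList sub e).mp hc))
    rw [hcnt]
    by_cases hm : e ∈ sub <;> simp [hm] <;> try omega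

-- counting characterisation: with e ∈ lst[k], the count reaches 2 iff another index contains e
theorem two_le_countP_iff (lst : List (List Int)) (e : Int) (k : Nat)
    (hk : k < lst.length) (he : e ∈ lst[k]) :
    2 ≤ lst.countP (fun t => decide (e ∈ t)) ↔
      ∃ j, ∃ hj : j < lst.length, j ≠ k ∧ e ∈ lst[j] := by
  induction lst generalizing k with
  | nil => simp at hk
  | cons a l ih =>
    cases k with
    | zero =>
      simp only [List.getElem_cons_zero] at he
      rw [List.countP_cons]
      simp only [he, decide_true, if_pos]
      constructor
      · intro h
        have h1 : 0 < l.countP (fun t => decide (e ∈ t)) := by omega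
        rw [List.countP_pos_iff] at h1
        obtain ⟨t, ht, hpt⟩ := h1
        obtain ⟨j, hj, rfl⟩ := List.mem_iff_getElem.mp ht
        exact ⟨j + 1, by simpa using hj, by omega, by simpa using of_decide_eq_true hpt⟩
      · rintro ⟨j, hj, hj0, hje⟩
        cases j with
        | zero => omega
        | succ j' =>
          have hj' : j' < l.length := by simpa using hj
          have : 0 < l.countP (fun t => decide (e ∈ t)) := by
            rw [List.countP_pos_iff]
            refine ⟨l[j'], List.getElem_mem _, by simpa using hje⟩
          omega
    | succ k' =>
      have hk' : k' < l.length := by simpa using hk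
      have he' : e ∈ l[k'] := by simpa using he
      rw [List.countP_cons]
      by_cases ha : e ∈ a
      · simp only [ha, decide_true, if_pos]
        constructor
        · intro _
          exact ⟨0, by simp, by omega, by simpa using ha⟩
        · intro _
          have : 0 < l.countP (fun t => decide (e ∈ t)) := by
            rw [List.countP_pos_iff]
            exact ⟨l[k'], List.getElem_mem _, by simpa using he'⟩
          omega
      · simp only [ha, decide_false, if_neg, Bool.false_eq_true, not_false_iff, Nat.add_zero]
        rw [ih k' hk' he']
        constructor
        · rintro ⟨j, hj, hjk, hje⟩
          exact ⟨j + 1, by simpa using hj, by omega, by simpa using hje⟩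
        · rintro ⟨j, hj, hjk, hje⟩
          cases j with
          | zero => exact absurd (by simpa using hje) ha
          | succ j' =>
            exact ⟨j', by simpa using hj, by omega, by simpa using hje⟩

-- projecting a filter-by-value through enumerate
theorem filter_enumerate_map (lst : List (List Int)) (Q : List Int → Bool) :
    ∀ s, (((PySem.List.enumerate lst s).filter (fun p => Q p.2)).map (fun p => p.2)) = lst.filter Q := by
  induction lst with
  | nil => intro s; simp [PySem.List.enumerate_nil]
  | cons x xs ih =>
    intro s
    rw [PySem.List.enumerate_cons]
    by_cases hq : Q x <;> simp [hq, ih (s + 1)]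

theorem find_sublists_with_common_elements_eq (lst : List (List Int)) :
    find_sublists_with_common_elements lst = find_sublists_with_common_elements_alt lst := by
  have hA : find_sublists_with_common_elements lst
      = ((PySem.List.enumerate lst).filter (fun p => pvAInner p.1 p.2 (PySem.List.enumerate lst))).map (fun p => p.2) := by
    unfold find_sublists_with_common_elements
    simpa using PySem.List.foldl_append_if
      (fun p : Int × List Int => pvAInner p.1 p.2 (PySem.List.enumerate lst))
      (fun p : Int × List Int => p.2) (PySem.List.enumerate lst) []
  have hcongr : (PySem.List.enumerate lst).filter (fun p => pvAInner p.1 p.2 (PySem.List.enumerate lst))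
      = (PySem.List.enumerate lst).filter (fun p =>
          p.2.any (fun e => decide ((lst.foldl (fun d sub =>
            (PySem.Set.ofList sub).foldl (fun d e => d.insert e (d.getD e 0 + 1)) d)
            (PySem.Dict.empty : PySem.Dict Int Int)).getD e 0 ≥ 2))) := by
    apply List.filter_congr
    intro p hp
    obtain ⟨k, hk, rfl⟩ := (PySem.List.mem_enumerate_iff _ _ _).mp hp
    rw [pvAInner_eq_any]
    rw [Bool.eq_iff_iff]
    simp only [List.any_eq_true, Bool.and_eq_true, decide_eq_true_eq]
    constructor
    · rintro ⟨q, hq, hiq, e, he2, he1⟩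
      obtain ⟨m, hm, rfl⟩ := (PySem.List.mem_enumerate_iff _ _ _).mp hq
      refine ⟨e, he1, ?_⟩
      rw [counts_getD, PySem.Dict.getD_empty, zero_add]
      have h2 : 2 ≤ lst.countP (fun t => decide (e ∈ t)) := by
        rw [two_le_countP_iff lst e k hk he1]
        exact ⟨m, hm, by intro hmk; exact hiq (by simp [hmk]), he2⟩
      exact_mod_cast h2
    · rintro ⟨e, he1, hcnt⟩
      rw [counts_getD, PySem.Dict.getD_empty, zero_add] at hcnt
      have h2 : 2 ≤ lst.countP (fun t => decide (e ∈ t)) := by exact_mod_cast hcnt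
      obtain ⟨j, hj, hjk, hje⟩ := (two_le_countP_iff lst e k hk he1).mp h2
      refine ⟨((0:Int) + j, lst[j]), ?_, ?_, e, hje, he1⟩
      · exact (PySem.List.mem_enumerate_iff _ _ _).mpr ⟨j, hj, rfl⟩
      · intro h
        have hji : (j : Int) = (k : Int) := by simpa using h.symm
        exact hjk (by exact_mod_cast hji)
  rw [hA, hcongr]
  exact (filter_enumerate_map lst (fun sub => sub.any (fun e => decide ((lst.foldl (fun d sub =>
      (PySem.Set.ofList sub).foldl (fun d e => d.insert e (d.getD e 0 + 1)) d)
      (PySem.Dict.empty : PySem.Dict Int Int)).getD e 0 ≥ 2))) 0).trans rfl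

-- ===== VERDICT (by name: the statement is the Claim_ definition above) =====
theorem find_sublists_with_common_elements_spec : Claim_equal_find_sublists_with_common_elements := by
  intro lst _
  exact find_sublists_with_common_elements_eq lst
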